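-- pv_equiv track=rewrite | github.com/mat4ixOG/code | MergeSimilarItems.py | mergeSimilarArr
-- ===== SOURCE A (Python) =====
-- from typing import List
--
-- def mergeSimilarArr(items1:List[List[int]] ,items2:List[List[int]])-> List[List[int]]:
--     weightMap = {}
--
--     for value , weights in items1 + items2:
--         if value in weightMap:
--             weightMap[value] += weights
--         else:
--             weightMap[value] = weights
--
--     result =  [[value , weights] for value , weights in weightMap.items()]
--     result.sort(key=lambda x: x[0])
--     return result
-- ===== SOURCE B (Python) =====
-- from typing import List
--
-- def mergeSimilarArr(items1: List[List[int]], items2: List[List[int]]) -> List[List[int]]: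
--     combined = sorted(items1 + items2, key=lambda it: it[0])
--     result = []
--     cur = None  # (value, running sum) of the current run, or None
--     for value, weights in combined:
--         if cur is None:
--             cur = (value, weights)
--         elif value == cur[0]:
--             cur = (cur[0], cur[1] + weights)
--         else:
--             result.append([cur[0], cur[1]])
--             cur = (value, weights)
--     if cur is not None:
--         result.append([cur[0], cur[1]])
--     return result
-- ===== Notes on version B (the rewrite author's own statement) =====
-- stated objective: alternative
-- what changed: Replaces the dict-accumulate-then-sort algorithm by sort-the-concatenation-first and a single adjacent-run merge pass that needs no dictionary.
import Mathlib
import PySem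

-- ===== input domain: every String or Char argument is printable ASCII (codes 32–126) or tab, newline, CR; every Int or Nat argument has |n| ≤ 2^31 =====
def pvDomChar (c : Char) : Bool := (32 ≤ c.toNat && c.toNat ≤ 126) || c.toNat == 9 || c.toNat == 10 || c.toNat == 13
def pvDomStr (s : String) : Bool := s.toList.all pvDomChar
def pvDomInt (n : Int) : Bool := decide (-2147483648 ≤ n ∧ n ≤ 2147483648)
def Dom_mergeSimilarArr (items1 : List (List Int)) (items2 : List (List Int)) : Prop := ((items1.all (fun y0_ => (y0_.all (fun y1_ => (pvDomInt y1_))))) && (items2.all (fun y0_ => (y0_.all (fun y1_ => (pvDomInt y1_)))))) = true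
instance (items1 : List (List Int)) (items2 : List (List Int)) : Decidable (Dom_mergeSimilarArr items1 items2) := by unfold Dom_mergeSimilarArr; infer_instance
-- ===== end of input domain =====

-- B replaces A's dict-accumulate-then-sort by sorting the concatenation first and merging adjacent equal-value runs in one pass (alternative algorithm, similar cost).


-- ===== PORT A =====
def mergeSimilarArr (items1 : List (List Int)) (items2 : List (List Int)) : List (List Int) :=
  let weightMap : PySem.Dict Int Int :=
    (items1 ++ items2).foldl (fun d l =>
      let value := PySem.List.pyGetD l 0 0      -- unpacking 'value, weights = l'; exact under Pre_ (|l| = 2)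
      let weights := PySem.List.pyGetD l 1 0
      if d.contains value then
        d.insert value (d.getD value 0 + weights)
      else
        d.insert value weights) PySem.Dict.empty
  let result := weightMap.items.map (fun p => [p.1, p.2])
  PySem.List.sorted result (fun x => PySem.List.pyGetD x 0 0)

-- ===== PORT B =====
def mergeSimilarArr_alt (items1 : List (List Int)) (items2 : List (List Int)) : List (List Int) :=
  let combined := PySem.List.sorted (items1 ++ items2) (fun it => PySem.List.pyGetD it 0 0)
  let fin := combined.foldl (fun st l =>
      let value := PySem.List.pyGetD l 0 0      -- unpacking 'value, weights = l'; exact under Pre_ (|l| = 2)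
      let weights := PySem.List.pyGetD l 1 0
      match st.2 with
      | none => (st.1, some (value, weights))
      | some (cv, cs) =>
          if value = cv then (st.1, some (cv, cs + weights))
          else (st.1 ++ [[cv, cs]], some (value, weights)))
    (([] : List (List Int)), (none : Option (Int × Int)))
  match fin.2 with
  | none => fin.1
  | some (cv, cs) => fin.1 ++ [[cv, cs]]

-- ===== PRECONDITION & SPEC =====
-- Pre_ excludes inputs with an inner list whose length is not 2: there Python's tuple unpacking raises ValueError in both A and B.
def Pre_mergeSimilarArr (items1 : List (List Int)) (items2 : List (List Int)) : Prop :=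
  ∀ l ∈ items1 ++ items2, l.length = 2
instance (items1 : List (List Int)) (items2 : List (List Int)) : Decidable (Pre_mergeSimilarArr items1 items2) := by unfold Pre_mergeSimilarArr; infer_instance
def pvWitness_mergeSimilarArr : List (List Int) × List (List Int) := ([[1, 2], [1, 3]], [[2, 5]])

def Spec_mergeSimilarArr (items1 : List (List Int)) (items2 : List (List Int)) (out : List (List Int)) : Prop := out = mergeSimilarArr_alt items1 items2
instance (items1 : List (List Int)) (items2 : List (List Int)) (out : List (List Int)) : Decidable (Spec_mergeSimilarArr items1 items2 out) := by unfold Spec_mergeSimilarArr; infer_instance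

-- ===== CLAIM (what is proved, stated in full; the proofs are below) =====
def Claim_equal_mergeSimilarArr : Prop := ∀ (items1 : List (List Int)) (items2 : List (List Int)), Dom_mergeSimilarArr items1 items2 → Pre_mergeSimilarArr items1 items2 → Spec_mergeSimilarArr items1 items2 (mergeSimilarArr items1 items2)

-- ===== LEMMAS AND PROOFS =====

-- pair view of an item list [v, w]
def pvToL (p : Int × Int) : List Int := [p.1, p.2]
-- total weight of key k in a pair list
def pvWsum (k : Int) (l : List (Int × Int)) : Int := ((l.filter (fun p => p.1 == k)).map (·.2)).sum
-- the common canonical result: sorted distinct keys, each with its total weight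
def pvCanon (l : List (Int × Int)) : List (List Int) :=
  (PySem.List.sorted (PySem.Set.ofList (l.map (·.1))) (fun x => x)).map (fun k => [k, pvWsum k l])

theorem pvWsum_nil (k : Int) : pvWsum k [] = 0 := rfl

theorem pvWsum_cons (k : Int) (p : Int × Int) (l : List (Int × Int)) :
    pvWsum k (p :: l) = (if p.1 = k then p.2 else 0) + pvWsum k l := by
  simp [pvWsum, List.filter_cons]
  split_ifs with h <;> simp

theorem pvWsum_cons_ne (k : Int) (p : Int × Int) (l : List (Int × Int)) (h : p.1 ≠ k) :
    pvWsum k (p :: l) = pvWsum k l := by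
  simp [pvWsum_cons, h]

theorem pvWsum_eq_zero (k : Int) (l : List (Int × Int)) (h : ∀ p ∈ l, p.1 ≠ k) :
    pvWsum k l = 0 := by
  induction l with
  | nil => rfl
  | cons p t ih =>
      rw [pvWsum_cons, if_neg (h p (by simp)), ih (fun q hq => h q (by simp [hq]))]
      simp

theorem pvWsum_perm (k : Int) {l l' : List (Int × Int)} (h : l.Perm l') :
    pvWsum k l = pvWsum k l' := by
  unfold pvWsum
  exact ((h.filter _).map _).sum_eq

-- Set.update on a cons'd accumulator
theorem pvUpdate_cons (x : Int) : ∀ (l : List Int) (s : List Int),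
    PySem.Set.update (x :: s) l = x :: PySem.Set.update s (l.filter (fun y => y != x)) := by
  intro l
  induction l with
  | nil => intro s; rfl
  | cons y l ih =>
      intro s
      by_cases hxy : y = x
      · subst hxy
        have h1 : PySem.Set.add (y :: s) y = y :: s := by
          simp [PySem.Set.add, PySem.Set.contains]
        simpa [PySem.Set.update, List.foldl_cons, h1, List.filter_cons] using ih s
      · by_cases hmem : y ∈ s
        · have h1 : PySem.Set.add (x :: s) y = x :: s := by
            simp [PySem.Set.add, PySem.Set.contains, hmem]
          have h2 : PySem.Set.add s y = s := by
            simp [PySem.Set.add, PySem.Set.contains, hmem]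
          simpa [PySem.Set.update, List.foldl_cons, h1, h2, List.filter_cons, hxy] using ih s
        · have h1 : PySem.Set.add (x :: s) y = x :: (s ++ [y]) := by
            simp [PySem.Set.add, PySem.Set.contains, hmem, hxy]
          have h2 : PySem.Set.add s y = s ++ [y] := by
            simp [PySem.Set.add, PySem.Set.contains, hmem]
          simpa [PySem.Set.update, List.foldl_cons, h1, h2, List.filter_cons, hxy] using ih (s ++ [y])

-- first-occurrence dedup, cons form
theorem pvOfList_cons (x : Int) (l : List Int) :
    PySem.Set.ofList (x :: l) = x :: PySem.Set.ofList (l.filter (fun y => y != x)) := by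
  have h1 : PySem.Set.add PySem.Set.empty x = [x] := by
    simp [PySem.Set.add, PySem.Set.contains, PySem.Set.empty]
  have := pvUpdate_cons x l []
  simpa [PySem.Set.ofList, PySem.Set.update, List.foldl_cons, h1] using this

-- dedup of a weakly sorted list is strictly sorted
theorem pvOfList_pairwise_lt_aux : ∀ (n : Nat) (l : List Int), l.length ≤ n → l.Pairwise (· ≤ ·) →
    (PySem.Set.ofList l).Pairwise (· < ·) := by
  intro n
  induction n with
  | zero =>
      intro l hl _
      have : l = [] := List.eq_nil_of_length_eq_zero (Nat.le_zero.mp hl)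
      subst this; simp [PySem.Set.ofList, PySem.Set.empty]
  | succ n ih =>
      intro l hl hp
      match l with
      | [] => simp [PySem.Set.ofList, PySem.Set.empty]
      | x :: t =>
          rw [pvOfList_cons]
          rw [List.pairwise_cons] at hp ⊢
          constructor
          · intro k hk
            rw [PySem.Set.mem_ofList] at hk
            have hk2 := List.of_mem_filter hk
            have hk3 := List.mem_of_mem_filter hk
            have hne : k ≠ x := by simpa using hk2
            exact lt_of_le_of_ne (hp.1 k hk3) (Ne.symm hne)
          · apply ih
            · calc (t.filter (fun y => y != x)).length ≤ t.length := List.length_filter_le _ _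
                _ ≤ n := Nat.le_of_succ_le_succ hl
            · exact List.Pairwise.filter _ hp.2

theorem pvOfList_pairwise_lt (l : List Int) (h : l.Pairwise (· ≤ ·)) :
    (PySem.Set.ofList l).Pairwise (· < ·) :=
  pvOfList_pairwise_lt_aux l.length l (Nat.le_refl _) h

-- ========== A side ==========

-- the dict loop, pair level, insert form
def pvAStep (d : PySem.Dict Int Int) (p : Int × Int) : PySem.Dict Int Int :=
  d.insert p.1 (d.getD p.1 0 + p.2)

theorem pvAfold_getD (k : Int) : ∀ (l : List (Int × Int)) (d : PySem.Dict Int Int),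
    (l.foldl pvAStep d).getD k 0 = d.getD k 0 + pvWsum k l := by
  intro l
  induction l with
  | nil => intro d; simp [pvWsum_nil]
  | cons p t ih =>
      intro d
      rw [List.foldl_cons, ih, pvWsum_cons]
      show (d.insert p.1 (d.getD p.1 0 + p.2)).getD k 0 + pvWsum k t = _
      rw [PySem.Dict.getD_insert]
      by_cases h : k = p.1
      · subst h; simp; ring
      · rw [if_neg h, if_neg (fun he => h he.symm)]; ring

theorem pvItems_eq_map_keys (d : PySem.Dict Int Int) (h : d.keys.Nodup) :
    d.items = d.keys.map (fun k => (k, d.getD k 0)) := by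
  have hmem : ∀ p ∈ d.items, (p.1, d.getD p.1 0) = p := by
    intro p hp
    obtain ⟨a, b⟩ := p
    rw [PySem.Dict.getD_of_mem_items d hp h]
  calc d.items = d.items.map (fun p => (p.1, d.getD p.1 0)) := by
        simpa using (List.map_congr_left hmem).symm
    _ = d.keys.map (fun k => (k, d.getD k 0)) := by
        simp only [PySem.Dict.keys, List.map_map]; rfl

theorem pvA_eq_canon (P : List (Int × Int)) :
    mergeSimilarArr (P.map pvToL) [] = pvCanon P := by
  unfold mergeSimilarArr
  rw [List.append_nil, List.foldl_map]
  have hstep : (fun (d : PySem.Dict Int Int) (p : Int × Int) =>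
      let value := PySem.List.pyGetD (pvToL p) 0 0
      let weights := PySem.List.pyGetD (pvToL p) 1 0
      if d.contains value then d.insert value (d.getD value 0 + weights)
      else d.insert value weights) = pvAStep := by
    funext d p
    have hv : PySem.List.pyGetD (pvToL p) 0 0 = p.1 := rfl
    have hw : PySem.List.pyGetD (pvToL p) 1 0 = p.2 := rfl
    simp only [hv, hw]
    by_cases hc : d.contains p.1
    · simp [hc, pvAStep]
    · have h0 : d.getD p.1 0 = 0 :=
        PySem.Dict.getD_of_not_contains d 0 (by simpa using hc)
      simp [hc, pvAStep, h0]
  rw [hstep]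
  set d := P.foldl pvAStep PySem.Dict.empty with hd
  have hkeys : d.keys = PySem.Set.ofList (P.map (·.1)) := by
    rw [hd]
    have := PySem.Dict.keys_foldl_insert_key (κ := Int) (ν := Int) P (·.1)
      (fun d p => d.getD p.1 0 + p.2) PySem.Dict.empty
    simpa [pvAStep, PySem.Dict.keys_empty, PySem.Set.update, PySem.Set.ofList,
      PySem.Set.empty] using this
  have hnodup : d.keys.Nodup := by
    rw [hd]
    exact PySem.Dict.nodup_keys_foldl_insert_key P (·.1) (fun d p => d.getD p.1 0 + p.2)
      PySem.Dict.empty PySem.Dict.nodup_keys_empty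
  have hgetD : ∀ k, d.getD k 0 = pvWsum k P := by
    intro k
    rw [hd, pvAfold_getD, PySem.Dict.getD_empty, Int.zero_add]
  have hitems : d.items.map (fun p => [p.1, p.2])
      = (PySem.Set.ofList (P.map (·.1))).map (fun k => [k, pvWsum k P]) := by
    rw [pvItems_eq_map_keys d hnodup, List.map_map, hkeys]
    exact List.map_congr_left (fun k _ => by simp [hgetD k])
  show PySem.List.sorted (d.items.map (fun p => [p.1, p.2])) (fun x => PySem.List.pyGetD x 0 0)
      = pvCanon P
  rw [hitems]
  unfold pvCanon
  exact PySem.List.sorted_eq_of_perm_of_pairwise_lt _ _ _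
    (((PySem.List.sorted_perm (PySem.Set.ofList (P.map (·.1))) (fun x => x) false)).map
      (fun k => [k, pvWsum k P]))
    (by
      have := PySem.List.sorted_ofList_pairwise_lt (P.map (·.1))
      rw [List.pairwise_map]
      exact this.imp (fun hab => by simpa [PySem.List.pyGetD] using hab))

-- ========== B side ==========

def pvBStep (st : List (List Int) × Option (Int × Int)) (p : Int × Int) :
    List (List Int) × Option (Int × Int) :=
  match st.2 with
  | none => (st.1, some p)
  | some (cv, cs) =>
      if p.1 = cv then (st.1, some (cv, cs + p.2))
      else (st.1 ++ [[cv, cs]], some p)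

def pvFinish (st : List (List Int) × Option (Int × Int)) : List (List Int) :=
  match st.2 with
  | none => st.1
  | some (cv, cs) => st.1 ++ [[cv, cs]]

theorem pvInsertBy_map (x : Int × Int) : ∀ (l : List (Int × Int)),
    PySem.List.insertBy (fun a b => decide (PySem.List.pyGetD a 0 0 < PySem.List.pyGetD b 0 0)) (pvToL x) (l.map pvToL)
      = (PySem.List.insertBy (fun a b => decide (a.1 < b.1)) x l).map pvToL := by
  intro l
  induction l with
  | nil => rfl
  | cons y t ih =>
      show PySem.List.insertBy _ (pvToL x) (pvToL y :: t.map pvToL) = _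
      rw [PySem.List.insertBy, PySem.List.insertBy]
      have hk : (decide (PySem.List.pyGetD (pvToL x) 0 0 < PySem.List.pyGetD (pvToL y) 0 0))
          = decide (x.1 < y.1) := rfl
      rw [hk]
      by_cases h : x.1 < y.1
      · simp [h]
      · simp only [decide_eq_true_eq, h, if_false, ih, List.map_cons]

theorem pvSorted_map (P : List (Int × Int)) :
    PySem.List.sorted (P.map pvToL) (fun it => PySem.List.pyGetD it 0 0)
      = (PySem.List.sorted P (fun p => p.1)).map pvToL := by
  have aux : ∀ (Q : List (Int × Int)) (acc : List (Int × Int)),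
      Q.foldl (fun a p =>
          PySem.List.insertBy (fun a b => decide (PySem.List.pyGetD a 0 0 < PySem.List.pyGetD b 0 0)) (pvToL p) a)
        (acc.map pvToL)
      = (Q.foldl (fun a p => PySem.List.insertBy (fun a b => decide (a.1 < b.1)) p a) acc).map pvToL := by
    intro Q
    induction Q with
    | nil => intro acc; rfl
    | cons p t ih =>
        intro acc
        rw [List.foldl_cons, List.foldl_cons, pvInsertBy_map p acc, ih]
  show (P.map pvToL).foldl (fun a x =>
      PySem.List.insertBy (fun a b => decide (PySem.List.pyGetD a 0 0 < PySem.List.pyGetD b 0 0)) x a) []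
    = _
  rw [List.foldl_map]
  exact aux P []

theorem pvRun : ∀ (T : List (Int × Int)) (res : List (List Int)) (cv cs : Int),
    T.Pairwise (fun a b => a.1 ≤ b.1) → (∀ p ∈ T, cv ≤ p.1) →
    pvFinish (T.foldl pvBStep (res, some (cv, cs)))
      = res ++ [cv, cs + pvWsum cv T] ::
          (PySem.Set.ofList ((T.map (·.1)).filter (fun y => y != cv))).map (fun k => [k, pvWsum k T]) := by
  intro T
  induction T with
  | nil =>
      intro res cv cs _ _
      simp [pvFinish, pvWsum_nil, PySem.Set.ofList, PySem.Set.empty]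
  | cons p T ih =>
      intro res cv cs hpw hbd
      rw [List.pairwise_cons] at hpw
      rw [List.foldl_cons]
      by_cases h : p.1 = cv
      · have hstep : pvBStep (res, some (cv, cs)) p = (res, some (cv, cs + p.2)) := by
          simp [pvBStep, h]
        rw [hstep, ih res cv (cs + p.2) hpw.2 (fun q hq => hbd q (by simp [hq]))]
        have hw : cs + p.2 + pvWsum cv T = cs + pvWsum cv (p :: T) := by
          rw [pvWsum_cons, if_pos h]; ring
        have hf : (T.map (·.1)).filter (fun y => y != cv)
            = ((p :: T).map (·.1)).filter (fun y => y != cv) := by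
          simp [h]
        rw [hw, hf]
        congr 1
        congr 1
        apply List.map_congr_left
        intro k hk
        rw [PySem.Set.mem_ofList] at hk
        have hkne : k ≠ p.1 := by
          have := List.of_mem_filter hk
          simp only [bne_iff_ne, ne_eq] at this
          rw [h]; exact this
        rw [pvWsum_cons_ne k p _ (fun he => hkne he.symm)]
      · have hlt : cv < p.1 := lt_of_le_of_ne (hbd p (by simp)) (fun he => h he.symm)
        have hstep : pvBStep (res, some (cv, cs)) p = (res ++ [[cv, cs]], some p) := by
          simp [pvBStep, h]
        have hbd' : ∀ q ∈ T, p.1 ≤ q.1 := fun q hq => hpw.1 q hq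
        rw [hstep]
        have := ih (res ++ [[cv, cs]]) p.1 p.2 hpw.2 hbd'
        rw [show (some p = some (p.1, p.2)) from rfl, this]
        have hTne : ∀ q ∈ T, q.1 ≠ cv := fun q hq => ne_of_gt (lt_of_lt_of_le hlt (hbd' q hq))
        have hz : pvWsum cv (p :: T) = 0 := by
          apply pvWsum_eq_zero
          intro q hq
          rcases List.mem_cons.mp hq with h1 | h1
          · subst h1; exact h
          · exact hTne q h1
        have hkeys : ((p :: T).map (·.1)).filter (fun y => y != cv) = p.1 :: T.map (·.1) := by
          rw [List.map_cons, List.filter_cons]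
          have hb : (p.1 != cv) = true := by simpa using h
          rw [if_pos hb]
          congr 1
          apply List.filter_eq_self.mpr
          intro k hk
          rcases List.mem_map.mp hk with ⟨q, hq, rfl⟩
          simpa using hTne q hq
        have hhead : pvWsum p.1 (p :: T) = p.2 + pvWsum p.1 T := by
          rw [pvWsum_cons, if_pos rfl]
        have htail : List.map (fun k => [k, pvWsum k (p :: T)])
            (PySem.Set.ofList (List.filter (fun y => y != p.1) (List.map (fun x => x.1) T)))
          = List.map (fun k => [k, pvWsum k T])
            (PySem.Set.ofList (List.filter (fun y => y != p.1) (List.map (fun x => x.1) T))) := by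
          apply List.map_congr_left
          intro k hk
          rw [PySem.Set.mem_ofList] at hk
          have hkne : k ≠ p.1 := by simpa using (List.of_mem_filter hk)
          rw [pvWsum_cons_ne k p _ (fun he => hkne he.symm)]
        rw [hz, hkeys, pvOfList_cons, List.map_cons, hhead, htail, add_zero]
        simp [List.append_assoc]

theorem pvB_eq_canon (P : List (Int × Int)) :
    mergeSimilarArr_alt (P.map pvToL) [] = pvCanon P := by
  unfold mergeSimilarArr_alt
  rw [List.append_nil, pvSorted_map]
  show pvFinish (((PySem.List.sorted P (fun p => p.1)).map pvToL).foldl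
      (fun st l =>
        let value := PySem.List.pyGetD l 0 0
        let weights := PySem.List.pyGetD l 1 0
        match st.2 with
        | none => (st.1, some (value, weights))
        | some (cv, cs) =>
            if value = cv then (st.1, some (cv, cs + weights))
            else (st.1 ++ [[cv, cs]], some (value, weights)))
      ([], none)) = pvCanon P
  rw [List.foldl_map]
  rw [PySem.List.foldl_congr_mem (PySem.List.sorted P (fun p => p.1)) _ pvBStep ([], none)
    (by
      intro st p _
      show (let value := PySem.List.pyGetD (pvToL p) 0 0
            let weights := PySem.List.pyGetD (pvToL p) 1 0
            match st.2 with
            | none => (st.1, some (value, weights))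
            | some (cv, cs) =>
                if value = cv then (st.1, some (cv, cs + weights))
                else (st.1 ++ [[cv, cs]], some (value, weights))) = pvBStep st p
      have hv : PySem.List.pyGetD (pvToL p) 0 0 = p.1 := rfl
      have hw : PySem.List.pyGetD (pvToL p) 1 0 = p.2 := rfl
      simp only [hv, hw, pvBStep])]
  have hperm : (PySem.List.sorted P (fun p => p.1)).Perm P :=
    PySem.List.sorted_perm P (fun p => p.1) false
  have hwsum : ∀ k, pvWsum k P = pvWsum k (PySem.List.sorted P (fun p => p.1)) :=
    fun k => pvWsum_perm k hperm.symm
  cases hS : PySem.List.sorted P (fun p => p.1) with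
  | nil =>
      have hP : P = [] := (PySem.List.sorted_eq_nil_iff P (fun p => p.1) false).mp hS
      subst hP
      rfl
  | cons p T =>
      have hpw : (p :: T).Pairwise (fun a b => a.1 ≤ b.1) := by
        rw [← hS]; exact PySem.List.sorted_pairwise P (fun p => p.1)
      rw [List.pairwise_cons] at hpw
      rw [List.foldl_cons]
      have h1 : pvBStep ([], none) p = ([], some (p.1, p.2)) := by simp [pvBStep]
      rw [h1, pvRun T [] p.1 p.2 hpw.2 hpw.1, List.nil_append]
      -- identify the canonical form
      have hkeys : PySem.List.sorted (PySem.Set.ofList (P.map (·.1))) (fun x => x)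
          = PySem.Set.ofList ((p :: T).map (·.1)) := by
        apply PySem.List.sorted_eq_of_perm_of_pairwise_lt
        · rw [List.perm_ext_iff_of_nodup (PySem.Set.nodup_ofList _) (PySem.Set.nodup_ofList _)]
          intro k
          rw [PySem.Set.mem_ofList, PySem.Set.mem_ofList, ← hS]
          exact ⟨fun hk => (hperm.map (·.1)).mem_iff.mp hk,
                 fun hk => (hperm.map (·.1)).mem_iff.mpr hk⟩
        · apply pvOfList_pairwise_lt
          rw [← hS]
          exact PySem.List.sorted_map_key_pairwise P (fun p => p.1)
      unfold pvCanon
      rw [hkeys, List.map_cons, pvOfList_cons, List.map_cons]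
      have hsP : ∀ k, pvWsum k P = pvWsum k (p :: T) := by
        intro k; rw [hwsum k, hS]
      congr 1
      · rw [hsP p.1, pvWsum_cons, if_pos rfl]
      · apply List.map_congr_left
        intro k hk
        rw [PySem.Set.mem_ofList] at hk
        have hkne : k ≠ p.1 := by simpa using (List.of_mem_filter hk)
        rw [hsP k, pvWsum_cons_ne k p _ (fun he => hkne he.symm)]

-- ===== VERDICT (by name: the statement is the Claim_ definition above) =====
theorem pvPairs_eq (items1 items2 : List (List Int))
    (hpre : Pre_mergeSimilarArr items1 items2) :
    ((items1 ++ items2).map (fun l => (PySem.List.pyGetD l 0 0, PySem.List.pyGetD l 1 0))).map pvToL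
      = items1 ++ items2 := by
  rw [List.map_map]
  have : ∀ l ∈ items1 ++ items2,
      (pvToL ∘ fun l => (PySem.List.pyGetD l 0 0, PySem.List.pyGetD l 1 0)) l = id l := by
    intro l hl
    have h2 := hpre l hl
    match l with
    | [a, b] => rfl
  rw [List.map_congr_left this, List.map_id]

theorem mergeSimilarArr_spec : Claim_equal_mergeSimilarArr := by
  intro items1 items2 _ hpre
  unfold Spec_mergeSimilarArr
  set P := (items1 ++ items2).map (fun l => (PySem.List.pyGetD l 0 0, PySem.List.pyGetD l 1 0)) with hP
  have hA : mergeSimilarArr items1 items2 = mergeSimilarArr (P.map pvToL) [] := by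
    rw [pvPairs_eq items1 items2 hpre]
    simp only [mergeSimilarArr, List.append_nil]
  have hB : mergeSimilarArr_alt items1 items2 = mergeSimilarArr_alt (P.map pvToL) [] := by
    rw [pvPairs_eq items1 items2 hpre]
    simp only [mergeSimilarArr_alt, List.append_nil]
  rw [hA, hB, pvA_eq_canon, pvB_eq_canon]
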